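-- pv_equiv track=rewrite | github.com/iam-fabulous/Snacks | Array_Snacks/evenpositionsofalist.py | even_position
-- ===== SOURCE A (Python) =====
-- def even_position(my_list):
-- #prints the elements in the even positions/indices of a list!
-- 	length = len(my_list)
-- 	for count in range(length):
-- 		if count % 2 == 0:
-- 			my_list[count] = my_list[count]
-- 		else:
-- 			my_list[count] = 0
-- 	return my_list
-- ===== SOURCE B (Python) =====
-- def even_position(my_list):
--     # same list object, mutated in place: stride-2 slice assignment zeroes the odd indices
--     my_list[1::2] = [0] * (len(my_list) // 2)
--     return my_list
-- ===== Notes on version B (the rewrite author's own statement) =====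
-- stated objective: idiomatic
-- what changed: Replaces the full-length index loop with a per-element parity branch by a single stride-2 slice assignment that writes zeros only at the odd positions.
import Mathlib
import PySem

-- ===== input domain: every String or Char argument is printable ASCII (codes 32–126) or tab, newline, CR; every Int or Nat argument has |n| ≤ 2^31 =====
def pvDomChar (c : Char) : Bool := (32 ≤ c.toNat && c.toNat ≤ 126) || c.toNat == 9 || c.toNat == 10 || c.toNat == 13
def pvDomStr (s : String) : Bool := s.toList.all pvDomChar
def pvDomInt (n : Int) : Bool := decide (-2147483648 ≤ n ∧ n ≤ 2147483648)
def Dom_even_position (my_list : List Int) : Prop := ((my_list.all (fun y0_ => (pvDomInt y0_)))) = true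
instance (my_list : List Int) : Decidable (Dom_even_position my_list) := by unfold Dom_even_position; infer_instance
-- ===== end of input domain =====

-- B zeroes the odd indices by a stride-2 slice assignment instead of A's full index loop with a parity branch.
-- Both Pythons mutate the argument in place and return it; the equivalence proved here is about the return value.

-- ===== PORT A =====
-- literal port: for count in range(len(my_list)): if count % 2 == 0 then rewrite the element, else write 0
def even_position (my_list : List Int) : List Int :=
  let length : Int := my_list.length
  (PySem.List.pyRange 0 length 1).foldl
    (fun l count =>
      if count % 2 == 0 then
        PySem.List.pySetD l count (PySem.List.pyGetD l count 0)
      else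
        PySem.List.pySetD l count 0) my_list

-- ===== PORT B =====
-- hand port of the stride-2 slice assignment my_list[1::2] = [0] * (len(my_list) // 2):
-- exact, since that assignment writes a 0 at each of the indices 1, 3, 5, … and nothing else
def zeroOddStride : List Int → List Int
  | [] => []
  | [x] => [x]
  | x :: _ :: rest => x :: 0 :: zeroOddStride rest

def even_position_alt (my_list : List Int) : List Int :=
  zeroOddStride my_list

-- ===== PRECONDITION & SPEC =====
def Spec_even_position (my_list : List Int) (out : List Int) : Prop := out = even_position_alt my_list
instance (my_list : List Int) (out : List Int) : Decidable (Spec_even_position my_list out) := by unfold Spec_even_position; infer_instance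

-- ===== CLAIM (what is proved, stated in full; the proofs are below) =====
def Claim_equal_even_position : Prop := ∀ (my_list : List Int), Dom_even_position my_list → Spec_even_position my_list (even_position my_list)

-- ===== LEMMAS AND PROOFS =====

-- pointwise description of "odd indices below n zeroed"
def zmap (n : Nat) (xs : List Int) : List Int :=
  xs.mapIdx (fun i x => if i < n ∧ i % 2 = 1 then 0 else x)

theorem length_zmap (n : Nat) (xs : List Int) : (zmap n xs).length = xs.length := by
  simp [zmap]

theorem zmap_zero (xs : List Int) : zmap 0 xs = xs := by
  apply List.ext_getElem <;> simp [zmap]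

theorem foldl_zmap (xs : List Int) (n : Nat) (hn : n ≤ xs.length) :
    (PySem.List.pyRange 0 (n : Int) 1).foldl
      (fun l count =>
        if count % 2 == 0 then
          PySem.List.pySetD l count (PySem.List.pyGetD l count 0)
        else
          PySem.List.pySetD l count 0) xs = zmap n xs := by
  induction n with
  | zero => simp [PySem.List.pyRange_one_eq_nil, zmap_zero]
  | succ n ih =>
    have hn' : n ≤ xs.length := Nat.le_of_succ_le hn
    have hcast : ((n + 1 : Nat) : Int) = (n : Int) + 1 := by push_cast; ring
    rw [hcast, PySem.List.pyRange_one_succ_right (by positivity), List.foldl_append, ih hn']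
    have hlt : n < xs.length := hn
    have hgd : PySem.List.pyGetD (zmap n xs) (n : Int) 0 = xs[n] := by
      rw [PySem.List.pyGetD_natCast]
      have : n < (zmap n xs).length := by rw [length_zmap]; exact hlt
      rw [List.getD_eq_getElem _ _ this]
      simp [zmap]
    by_cases hpar : n % 2 = 0
    · have : ((n : Int) % 2 == 0) = true := by
        have : (n : Int) % 2 = 0 := by omega
        simp [this]
      simp only [List.foldl_cons, List.foldl_nil, this, if_true]
      rw [hgd, PySem.List.pySetD_natCast]
      apply List.ext_getElem
      · simp [zmap]
      · intro j h1 h2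
        simp only [zmap, List.getElem_set, List.getElem_mapIdx]
        by_cases hje : n = j
        · subst hje
          simp
          intro h
          omega
        · rw [if_neg hje]
          have hiff : (j < n ∧ j % 2 = 1) ↔ (j < n + 1 ∧ j % 2 = 1) := by omega
          rw [if_congr hiff rfl rfl]
    · have : ((n : Int) % 2 == 0) = false := by
        have : (n : Int) % 2 = 1 := by omega
        simp [this]
      simp only [List.foldl_cons, List.foldl_nil, this, if_false, Bool.false_eq_true]
      rw [PySem.List.pySetD_natCast]
      apply List.ext_getElem
      · simp [zmap]
      · intro j h1 h2
        simp only [zmap, List.getElem_set, List.getElem_mapIdx]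
        by_cases hje : n = j
        · subst hje
          have h1' : n < n + 1 ∧ n % 2 = 1 := by omega
          simp [h1']
        · rw [if_neg hje]
          have hiff : (j < n ∧ j % 2 = 1) ↔ (j < n + 1 ∧ j % 2 = 1) := by omega
          rw [if_congr hiff rfl rfl]

theorem length_zeroOddStride (xs : List Int) : (zeroOddStride xs).length = xs.length := by
  induction xs using zeroOddStride.induct with
  | case1 => simp [zeroOddStride]
  | case2 x => simp [zeroOddStride]
  | case3 x y rest ih => simp [zeroOddStride, ih]

theorem getElem_zeroOddStride (xs : List Int) (j : Nat) (h : j < xs.length)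
    (h' : j < (zeroOddStride xs).length) :
    (zeroOddStride xs)[j] = if j % 2 = 1 then 0 else xs[j] := by
  induction xs using zeroOddStride.induct generalizing j with
  | case1 => simp at h
  | case2 x =>
    have hj0 : j = 0 := by simp at h; omega
    subst hj0
    simp [zeroOddStride]
  | case3 x y rest ih =>
    match j with
    | 0 => simp [zeroOddStride]
    | 1 => simp [zeroOddStride]
    | (k + 2) =>
      have hk : k < rest.length := by simpa using h
      have hk' : k < (zeroOddStride rest).length := by rw [length_zeroOddStride]; exact hk
      simp only [zeroOddStride, List.getElem_cons_succ]
      rw [ih k hk hk']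
      have : (k + 2) % 2 = k % 2 := by omega
      simp [this]

theorem zeroOddStride_eq_zmap (xs : List Int) : zeroOddStride xs = zmap xs.length xs := by
  apply List.ext_getElem
  · simp [length_zeroOddStride, length_zmap]
  · intro j h1 h2
    have hj : j < xs.length := by simpa [length_zeroOddStride] using h1
    rw [getElem_zeroOddStride xs j hj h1]
    simp only [zmap, List.getElem_mapIdx]
    by_cases hp : j % 2 = 1 <;> simp [hp, hj]

-- ===== VERDICT (by name: the statement is the Claim_ definition above) =====
theorem even_position_spec : Claim_equal_even_position := by
  intro my_list _
  show even_position my_list = even_position_alt my_list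
  unfold even_position even_position_alt
  rw [foldl_zmap my_list my_list.length le_rfl, zeroOddStride_eq_zmap]
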